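-- pv_equiv track=rewrite | github.com/mohamedbihroongit/project-1 | app.py | round_robin_merge
-- ===== SOURCE A (Python) =====
-- def round_robin_merge(file_lists):
--     merged = []
--     if not file_lists: return []
--     max_len = max(len(lst) for lst in file_lists)
--     for i in range(max_len):
--         for lst in file_lists:
--             if i < len(lst):
--                 merged.append(lst[i])
--     return merged
-- ===== SOURCE B (Python) =====
-- def round_robin_merge(file_lists):
--     # Round-robin via a shrinking pool of iterators: each pass pulls one item
--     # from every still-alive iterator (unique sentinel marks exhaustion).
--     sentinel = object()
--     iters = [iter(lst) for lst in file_lists]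
--     merged = []
--     while iters:
--         alive = []
--         for it in iters:
--             x = next(it, sentinel)
--             if x is not sentinel:
--                 merged.append(x)
--                 alive.append(it)
--         iters = alive
--     return merged
-- ===== Notes on version B (the rewrite author's own statement) =====
-- stated objective: alternative
-- what changed: Replaces A's index loop (range over max length with an i < len(lst) bound check per list per round) by a shrinking pool of per-list iterators advanced in round-robin passes, dropping an iterator permanently once exhausted.
import Mathlib
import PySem

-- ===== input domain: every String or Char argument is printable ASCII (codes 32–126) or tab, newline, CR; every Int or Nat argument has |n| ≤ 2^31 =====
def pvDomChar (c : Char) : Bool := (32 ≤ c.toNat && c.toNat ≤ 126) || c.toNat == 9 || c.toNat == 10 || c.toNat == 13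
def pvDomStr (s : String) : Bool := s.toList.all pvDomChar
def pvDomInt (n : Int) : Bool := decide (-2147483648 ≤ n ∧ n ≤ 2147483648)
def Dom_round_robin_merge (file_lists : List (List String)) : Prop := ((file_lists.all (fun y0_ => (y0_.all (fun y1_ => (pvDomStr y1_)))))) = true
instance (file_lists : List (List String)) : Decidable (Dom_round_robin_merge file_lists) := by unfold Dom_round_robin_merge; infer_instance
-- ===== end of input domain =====

-- B replaces A's index loop with a shrinking pool of per-list cursors advanced in round-robin passes (alternative decomposition, same result).


-- ===== PORT A =====
def round_robin_merge (file_lists : List (List String)) : List String :=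
  if file_lists = [] then [] else
  match PySem.List.max? (file_lists.map (fun lst => (lst.length : Int))) (fun x => x) with
  | none => []   -- unreachable: file_lists ≠ [] so the generator is nonempty
  | some max_len =>
    (PySem.List.pyRange 0 max_len 1).foldl (fun merged i =>
      file_lists.foldl (fun merged lst =>
        if i < (lst.length : Int) then merged ++ (PySem.List.pyGet? lst i).toList else merged) merged) []

-- ===== PORT B =====
-- next(it, sentinel) on a list cursor: none = exhausted; a live cursor yields its head and its tail
def rrStep (l : List String) : Option (String × List String) :=
  match l with
  | [] => none
  | x :: xs => some (x, xs)

-- one while-loop iteration: pull one item from every alive cursor, keep the advanced alive cursors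
theorem rrMeasure_lt (iters : List (List String)) (h : iters ≠ []) :
    (((iters.filterMap rrStep).map Prod.snd).map List.length).sum + (iters.filterMap rrStep).length
      < (iters.map List.length).sum + iters.length := by
  have key : ∀ its : List (List String),
      (((its.filterMap rrStep).map Prod.snd).map List.length).sum + (its.filterMap rrStep).length
        ≤ (its.map List.length).sum := by
    intro its
    induction its with
    | nil => simp
    | cons l t ih =>
      cases l with
      | nil =>
        simp only [List.filterMap_cons, show rrStep ([] : List String) = none from rfl,
          List.map_cons, List.sum_cons]
        omega
      | cons x xs =>
        simp only [List.filterMap_cons, show rrStep (x :: xs) = some (x, xs) from rfl,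
          List.map_cons, List.sum_cons, List.length_cons]
        omega
  have hlen : 0 < iters.length := List.length_pos_iff.mpr h
  have := key iters
  omega

def rrPass (iters : List (List String)) : List String :=
  if h : iters = [] then [] else
    let step := iters.filterMap rrStep
    step.map Prod.fst ++ rrPass (step.map Prod.snd)
termination_by (iters.map List.length).sum + iters.length
decreasing_by
  have := rrMeasure_lt iters h
  simpa using this

def round_robin_merge_alt (file_lists : List (List String)) : List String :=
  rrPass file_lists

-- ===== PRECONDITION & SPEC =====
def Spec_round_robin_merge (file_lists : List (List String)) (out : List String) : Prop := out = round_robin_merge_alt file_lists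
instance (file_lists : List (List String)) (out : List String) : Decidable (Spec_round_robin_merge file_lists out) := by unfold Spec_round_robin_merge; infer_instance

-- ===== CLAIM (what is proved, stated in full; the proofs are below) =====
def Claim_equal_round_robin_merge : Prop := ∀ (file_lists : List (List String)), Dom_round_robin_merge file_lists → Spec_round_robin_merge file_lists (round_robin_merge file_lists)

-- ===== LEMMAS AND PROOFS =====

-- canonical form both programs compute: rows 0..n-1, row i = the i-th entries of the lists that have one
def mergeN (n : Nat) (fls : List (List String)) : List String :=
  (List.range n).flatMap (fun i => fls.filterMap (fun l => l[i]?))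

theorem filterMap_getElem_succ (fls : List (List String)) (i : Nat) :
    fls.filterMap (fun l => l[i+1]?) = (fls.filterMap List.tail?).filterMap (fun l => l[i]?) := by
  induction fls with
  | nil => simp
  | cons l t ih =>
    cases l with
    | nil => simpa using ih
    | cons x xs =>
      simp only [List.filterMap_cons, show (x :: xs).tail? = some xs from rfl,
        List.getElem?_cons_succ]
      cases hx : xs[i]? <;> simp [ih]

theorem step_fst (fls : List (List String)) :
    (fls.filterMap rrStep).map Prod.fst = fls.filterMap List.head? := by
  induction fls with
  | nil => rfl
  | cons l t ih =>
    cases l with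
    | nil =>
      simp only [List.filterMap_cons, show rrStep ([] : List String) = none from rfl,
        show ([] : List String).head? = none from rfl]
      exact ih
    | cons x xs =>
      simp only [List.filterMap_cons, show rrStep (x :: xs) = some (x, xs) from rfl,
        show (x :: xs).head? = some x from rfl, List.map_cons]
      rw [ih]

theorem step_snd (fls : List (List String)) :
    (fls.filterMap rrStep).map Prod.snd = fls.filterMap List.tail? := by
  induction fls with
  | nil => rfl
  | cons l t ih =>
    cases l with
    | nil =>
      simp only [List.filterMap_cons, show rrStep ([] : List String) = none from rfl,
        show ([] : List String).tail? = none from rfl]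
      exact ih
    | cons x xs =>
      simp only [List.filterMap_cons, show rrStep (x :: xs) = some (x, xs) from rfl,
        show (x :: xs).tail? = some xs from rfl, List.map_cons]
      rw [ih]

theorem rrPass_eq_mergeN (n : Nat) (fls : List (List String))
    (hb : ∀ l ∈ fls, l.length ≤ n) : rrPass fls = mergeN n fls := by
  induction n generalizing fls with
  | zero =>
    have hall : ∀ l ∈ fls, l = [] := by
      intro l hl; have := hb l hl; simpa using List.length_eq_zero_iff.mp (Nat.le_zero.mp this)
    rw [rrPass.eq_def]
    by_cases h : fls = []
    · simp [h, mergeN]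
    · have hstep : fls.filterMap rrStep = [] := by
        rw [List.filterMap_eq_nil_iff]
        intro l hl; rw [hall l hl]; rfl
      simp [h, hstep, rrPass.eq_def, mergeN]
  | succ n ih =>
    rw [rrPass.eq_def]
    by_cases h : fls = []
    · simp [h, mergeN]
    · simp only [h, dite_false]
      have hrow0 : (fls.filterMap rrStep).map Prod.fst = fls.filterMap (fun l => l[0]?) := by
        rw [step_fst]; simp [List.head?_eq_getElem?]
      have htails : ∀ l ∈ fls.filterMap List.tail?, l.length ≤ n := by
        intro l hl
        rcases List.mem_filterMap.mp hl with ⟨l', hl', hsome⟩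
        cases l' with
        | nil => simp at hsome
        | cons x xs =>
          have hx : xs = l := by simpa using hsome
          subst hx
          have := hb _ hl'
          simp only [List.length_cons] at this
          omega
      have hrec : rrPass ((fls.filterMap rrStep).map Prod.snd) = mergeN n (fls.filterMap List.tail?) := by
        rw [step_snd]; exact ih _ htails
      rw [hrow0, hrec]
      unfold mergeN
      rw [List.range_succ_eq_map]
      simp only [List.flatMap_cons, List.flatMap_map,
        Nat.succ_eq_add_one, filterMap_getElem_succ]

theorem inner_loop (fls : List (List String)) (i : Int) (hi : 0 ≤ i) (acc : List String) :
    fls.foldl (fun merged lst =>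
        if i < (lst.length : Int) then merged ++ (PySem.List.pyGet? lst i).toList else merged) acc
      = acc ++ fls.filterMap (fun l => l[i.toNat]?) := by
  induction fls generalizing acc with
  | nil => simp
  | cons l t ih =>
    by_cases h : i < (l.length : Int)
    · have hget : PySem.List.pyGet? l i = some l[i.toNat] :=
        PySem.List.pyGet?_eq_some_getElem l hi h
      have hsome : l[i.toNat]? = some l[i.toNat] := by
        rw [List.getElem?_eq_getElem]
      simp [h, ih, hget, hsome]
    · have hnone : l[i.toNat]? = none := by
        rw [List.getElem?_eq_none_iff]
        omega
      simp [h, ih, hnone]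

theorem a_eq_mergeN (fls : List (List String)) (m : Int)
    (hm : PySem.List.max? (fls.map (fun lst => (lst.length : Int))) (fun x => x) = some m)
    (hne : fls ≠ []) :
    round_robin_merge fls = mergeN m.toNat fls := by
  have hmax := PySem.List.max?_isMax hm
  have hmem := PySem.List.max?_mem hm
  have hm0 : 0 ≤ m := by
    rcases List.mem_map.mp hmem with ⟨l, _, hl⟩
    omega
  unfold round_robin_merge
  simp only [hne, if_false, hm]
  have hcongr : (PySem.List.pyRange 0 m 1).foldl (fun merged i =>
      fls.foldl (fun merged lst =>
        if i < (lst.length : Int) then merged ++ (PySem.List.pyGet? lst i).toList else merged) merged) []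
      = (PySem.List.pyRange 0 m 1).foldl (fun merged i =>
          merged ++ fls.filterMap (fun l => l[i.toNat]?)) [] := by
    apply PySem.List.foldl_congr_mem
    intro acc i hi
    have := (PySem.List.mem_pyRange_one.mp hi).1
    exact inner_loop fls i this acc
  rw [hcongr, PySem.List.foldl_append_eq_flatMap, PySem.List.pyRange_one]
  unfold mergeN
  simp [List.flatMap_map]

-- ===== VERDICT (by name: the statement is the Claim_ definition above) =====
theorem round_robin_merge_spec : Claim_equal_round_robin_merge := by
  intro fls _
  unfold Spec_round_robin_merge round_robin_merge_alt
  by_cases h : fls = []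
  · subst h; simp [round_robin_merge, rrPass]
  · obtain ⟨m, hm⟩ : ∃ m, PySem.List.max? (fls.map (fun lst => (lst.length : Int))) (fun x => x) = some m := by
      cases hx : PySem.List.max? (fls.map (fun lst => (lst.length : Int))) (fun x => x) with
      | none => exact absurd (by simpa using (PySem.List.max?_eq_none_iff _ _).mp hx) h
      | some m => exact ⟨m, rfl⟩
    have hmax := PySem.List.max?_isMax hm
    rw [a_eq_mergeN fls m hm h]
    symm
    apply rrPass_eq_mergeN
    intro l hl
    have := hmax _ (List.mem_map_of_mem hl)
    omega
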